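-- pv_equiv track=rewrite | github.com/EISLAW/EISLAWManagerWebApp | backend/rag_sqlite.py | _escape_meili_filter_value
-- ===== SOURCE A (Python) =====
-- def _escape_meili_filter_value(value: str) -> str:
--     """Escape user-provided values used inside single-quoted Meilisearch filter strings."""
--     if value is None:
--         raise ValueError('filter value is None')
--     if not isinstance(value, str):
--         value = str(value)
--     # Disallow control characters/newlines in filter values
--     if any(ord(ch) < 32 for ch in value):
--         raise ValueError('filter value contains control characters')
--     # Escape backslash and single-quote for Meilisearch filter strings
--     return value.replace("\\", "\\\\").replace("'", "\\'")
-- ===== SOURCE B (Python) =====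
-- def _escape_meili_filter_value(value: str) -> str:
--     """Escape user-provided values used inside single-quoted Meilisearch filter strings."""
--     if value is None:
--         raise ValueError('filter value is None')
--     if not isinstance(value, str):
--         value = str(value)
--     parts = []
--     for ch in value:
--         if ord(ch) < 32:
--             raise ValueError('filter value contains control characters')
--         elif ch == '\\':
--             parts.append('\\\\')
--         elif ch == "'":
--             parts.append("\\'")
--         else:
--             parts.append(ch)
--     return ''.join(parts)
-- ===== Notes on version B (the rewrite author's own statement) =====
-- stated objective: alternative
-- what changed: Replaces A's two-pass approach (a control-character validation scan followed by two chained str.replace passes, each building an intermediate string) with a single explicit loop that validates and escapes each character in one pass, joining the parts at the end.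
import Mathlib
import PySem

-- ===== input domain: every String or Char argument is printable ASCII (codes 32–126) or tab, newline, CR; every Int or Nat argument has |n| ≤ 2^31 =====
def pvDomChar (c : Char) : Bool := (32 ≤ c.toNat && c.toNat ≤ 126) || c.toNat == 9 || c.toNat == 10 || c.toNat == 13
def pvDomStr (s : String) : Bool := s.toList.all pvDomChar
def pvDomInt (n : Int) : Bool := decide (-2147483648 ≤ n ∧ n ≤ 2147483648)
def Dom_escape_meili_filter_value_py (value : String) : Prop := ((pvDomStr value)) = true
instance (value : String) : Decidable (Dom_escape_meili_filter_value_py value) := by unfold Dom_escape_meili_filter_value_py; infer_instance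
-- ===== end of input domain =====

-- B fuses A's validation scan and the two chained str.replace passes into one explicit per-character loop (alternative decomposition; same O(n) cost).


-- ===== PORT A =====
-- A: validation scan (the raise branch lies outside Pre_), then value.replace("\\","\\\\").replace("'","\\'")
def escape_meili_filter_value_py (value : String) : String :=
  PySem.Str.replace (PySem.Str.replace value "\\" "\\\\") "'" "\\'"

-- ===== PORT B =====
-- B: one pass; per character (the control-char raise branch lies outside Pre_) append its escaped form, then join
def escape_meili_filter_value_py_alt (value : String) : String :=
  String.ofList (value.toList.foldl
    (fun parts ch =>
      parts ++ (if ch = '\\' then ['\\', '\\'] else if ch = '\'' then ['\\', '\''] else [ch])) [])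

-- ===== PRECONDITION & SPEC =====
-- Pre_ excludes exactly the inputs containing control characters (code < 32), on which the Python A raises ValueError.
def Pre_escape_meili_filter_value_py (value : String) : Prop :=
  value.toList.all (fun c => 32 ≤ c.toNat) = true
instance (value : String) : Decidable (Pre_escape_meili_filter_value_py value) := by unfold Pre_escape_meili_filter_value_py; infer_instance
def pvWitness_escape_meili_filter_value_py : String := "it's a \\ test"

def Spec_escape_meili_filter_value_py (value : String) (out : String) : Prop := out = escape_meili_filter_value_py_alt value
instance (value : String) (out : String) : Decidable (Spec_escape_meili_filter_value_py value out) := by unfold Spec_escape_meili_filter_value_py; infer_instance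

-- ===== CLAIM (what is proved, stated in full; the proofs are below) =====
def Claim_equal_escape_meili_filter_value_py : Prop := ∀ (value : String), Dom_escape_meili_filter_value_py value → Pre_escape_meili_filter_value_py value → Spec_escape_meili_filter_value_py value (escape_meili_filter_value_py value)

-- ===== LEMMAS AND PROOFS =====

-- per-character substitution performed by a single-character replace
def pvSubst (c : Char) (new : List Char) (x : Char) : List Char :=
  if x = c then new else [x]

theorem replace_go_single (c : Char) (new : List Char) :
    ∀ (l : List Char) (fuel : Nat) (acc : List Char), l.length ≤ fuel →
      PySem.Chars.replace.go [c] new fuel l acc = acc.reverse ++ l.flatMap (pvSubst c new) := by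
  intro l
  induction l with
  | nil =>
    intro fuel acc _
    cases fuel <;> simp [PySem.Chars.replace.go]
  | cons h t ih =>
    intro fuel acc hf
    cases fuel with
    | zero => simp at hf
    | succ f =>
      by_cases hc : h = c
      · subst hc
        have hpre : List.isPrefixOf [h] (h :: t) = true := by
          simp [List.isPrefixOf]
        rw [PySem.Chars.replace.go, if_pos hpre]
        simp only [List.length_cons] at hf
        rw [List.length_singleton, List.drop_one, List.tail_cons,
          ih f (new.reverse ++ acc) (by omega)]
        simp [pvSubst]
      · have hpre : List.isPrefixOf [c] (h :: t) = false := by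
          simp [List.isPrefixOf]
          intro h'; exact absurd h'.symm hc
        rw [PySem.Chars.replace.go, if_neg (by simp [hpre])]
        simp only [List.length_cons] at hf
        rw [ih f (h :: acc) (by omega)]
        simp [pvSubst, hc]

theorem replace_single (c : Char) (new s : List Char) :
    PySem.Chars.replace s [c] new = s.flatMap (pvSubst c new) := by
  rw [PySem.Chars.replace]
  simp only [List.isEmpty_cons]
  exact replace_go_single c new s s.length [] (le_refl _)

-- ===== VERDICT (by name: the statement is the Claim_ definition above) =====
theorem escape_meili_filter_value_py_spec : Claim_equal_escape_meili_filter_value_py := by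
  intro value _ _
  unfold Spec_escape_meili_filter_value_py escape_meili_filter_value_py escape_meili_filter_value_py_alt
  rw [PySem.List.foldl_append_eq_flatMap]
  simp only [PySem.Str.replace, String.toList_ofList]
  rw [show ("\\" : String).toList = ['\\'] from rfl, show ("'" : String).toList = ['\''] from rfl,
    show ("\\\\" : String).toList = ['\\','\\'] from rfl, show ("\\'" : String).toList = ['\\','\''] from rfl]
  rw [replace_single, replace_single, List.flatMap_assoc]
  rw [List.nil_append]
  congr 1
  apply List.flatMap_congr
  intro x _
  by_cases h1 : x = '\\' <;> by_cases h2 : x = '\'' <;>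
    simp_all [pvSubst]
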